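-- pv_equiv track=rewrite | github.com/desashuno/BibleApp | data-pipeline/normalizers/geography.py | _derive_era
-- ===== SOURCE A (Python) =====
-- def _derive_era(verse_refs: list[int]) -> str:
--     """Derive era from verse references. OT books 1-39, NT books 40-66."""
--     has_ot = False
--     has_nt = False
--     for gid in verse_refs:
--         book = gid // 1_000_000
--         if 1 <= book <= 39:
--             has_ot = True
--         elif 40 <= book <= 66:
--             has_nt = True
--         if has_ot and has_nt:
--             return "AllEras"
--     if has_ot:
--         return "OldTestament"
--     if has_nt:
--         return "NewTestament"
--     return "AllEras"
-- ===== SOURCE B (Python) =====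
-- def _derive_era(verse_refs: list[int]) -> str:
--     """Derive era from verse references. OT books 1-39, NT books 40-66."""
--     has_ot = any(1 <= gid // 1_000_000 <= 39 for gid in verse_refs)
--     has_nt = any(40 <= gid // 1_000_000 <= 66 for gid in verse_refs)
--     if has_ot and has_nt:
--         return "AllEras"
--     if has_ot:
--         return "OldTestament"
--     if has_nt:
--         return "NewTestament"
--     return "AllEras"
-- ===== Notes on version B (the rewrite author's own statement) =====
-- stated objective: simpler
-- what changed: Replaced the fused early-exit loop with mutable flags by two independent declarative any() scans followed by a four-way table lookup on the (has_ot, has_nt) pair.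
import Mathlib
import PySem

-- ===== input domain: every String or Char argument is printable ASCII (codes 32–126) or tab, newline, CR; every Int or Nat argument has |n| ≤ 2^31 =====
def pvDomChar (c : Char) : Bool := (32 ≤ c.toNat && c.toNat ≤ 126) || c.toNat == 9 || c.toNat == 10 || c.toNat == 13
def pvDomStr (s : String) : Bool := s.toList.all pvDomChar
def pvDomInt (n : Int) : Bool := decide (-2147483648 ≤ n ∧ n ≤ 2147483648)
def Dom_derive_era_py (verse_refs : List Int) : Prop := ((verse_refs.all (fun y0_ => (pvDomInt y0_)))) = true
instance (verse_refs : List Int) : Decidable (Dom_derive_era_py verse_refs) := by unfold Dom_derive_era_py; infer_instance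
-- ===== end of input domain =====

-- B replaces A's single fused early-exit loop with two mutable flags by two independent any() scans and a four-way table on the resulting pair (objective: simpler).


-- ===== PORT A =====
-- A: single fused pass carrying two mutable flags, early return once both are set.
def pvLoopA : List Int → Bool → Bool → String
  | [], has_ot, has_nt =>
      if has_ot then "OldTestament"
      else if has_nt then "NewTestament"
      else "AllEras"
  | gid :: rest, has_ot, has_nt =>
      let book := PySem.Int.floordiv gid 1000000
      let has_ot' := if 1 ≤ book ∧ book ≤ 39 then true else has_ot
      let has_nt' := if ¬(1 ≤ book ∧ book ≤ 39) ∧ (40 ≤ book ∧ book ≤ 66) then true else has_nt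
      if has_ot' && has_nt' then "AllEras" else pvLoopA rest has_ot' has_nt'

def derive_era_py (verse_refs : List Int) : String :=
  pvLoopA verse_refs false false

-- ===== PORT B =====
-- B: two independent full scans, then a four-way table on the pair of flags.
def pvIsOT (gid : Int) : Bool := decide (1 ≤ PySem.Int.floordiv gid 1000000 ∧ PySem.Int.floordiv gid 1000000 ≤ 39)
def pvIsNT (gid : Int) : Bool := decide (40 ≤ PySem.Int.floordiv gid 1000000 ∧ PySem.Int.floordiv gid 1000000 ≤ 66)

def derive_era_py_alt (verse_refs : List Int) : String :=
  let has_ot := verse_refs.any pvIsOT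
  let has_nt := verse_refs.any pvIsNT
  if has_ot && has_nt then "AllEras"
  else if has_ot then "OldTestament"
  else if has_nt then "NewTestament"
  else "AllEras"

-- ===== PRECONDITION & SPEC =====
def Spec_derive_era_py (verse_refs : List Int) (out : String) : Prop := out = derive_era_py_alt verse_refs
instance (verse_refs : List Int) (out : String) : Decidable (Spec_derive_era_py verse_refs out) := by unfold Spec_derive_era_py; infer_instance

-- ===== CLAIM (what is proved, stated in full; the proofs are below) =====
def Claim_equal_derive_era_py : Prop := ∀ (verse_refs : List Int), Dom_derive_era_py verse_refs → Spec_derive_era_py verse_refs (derive_era_py verse_refs)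

-- ===== LEMMAS AND PROOFS =====
-- table result as a function of the two flags
def pvFinish (ot nt : Bool) : String :=
  if ot && nt then "AllEras"
  else if ot then "OldTestament"
  else if nt then "NewTestament"
  else "AllEras"

-- invariant of A's loop (for reachable states: never both flags already set):
-- its result equals the table applied to the accumulated flags
lemma pvLoopA_finish (xs : List Int) : ∀ (ot nt : Bool), (ot && nt) = false →
    pvLoopA xs ot nt = pvFinish (ot || xs.any pvIsOT) (nt || xs.any pvIsNT) := by
  induction xs with
  | nil => intro ot nt h; cases ot <;> cases nt <;> simp_all [pvLoopA, pvFinish]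
  | cons g rest ih =>
      intro ot nt h
      by_cases hot : 1 ≤ PySem.Int.floordiv g 1000000 ∧ PySem.Int.floordiv g 1000000 ≤ 39
      · have e1 : (decide (1 ≤ PySem.Int.floordiv g 1000000) && decide (PySem.Int.floordiv g 1000000 ≤ 39)) = true := by
          simp only [Bool.and_eq_true, decide_eq_true_eq]; omega
        have e2 : (decide (40 ≤ PySem.Int.floordiv g 1000000) && decide (PySem.Int.floordiv g 1000000 ≤ 66)) = false := by
          simp only [Bool.and_eq_false_iff, decide_eq_false_iff_not]; omega
        have hOT : pvIsOT g = true := by simp only [pvIsOT, Bool.decide_and]; exact e1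
        have hNT : pvIsNT g = false := by simp only [pvIsNT, Bool.decide_and]; exact e2
        cases ot <;> cases nt <;>
          simp_all [pvLoopA, pvFinish, e1, e2, hOT, hNT, ih]
      · by_cases hnt : 40 ≤ PySem.Int.floordiv g 1000000 ∧ PySem.Int.floordiv g 1000000 ≤ 66
        ·
          have e1 : (decide (1 ≤ PySem.Int.floordiv g 1000000) && decide (PySem.Int.floordiv g 1000000 ≤ 39)) = false := by
            simp only [Bool.and_eq_false_iff, decide_eq_false_iff_not]; omega
          have e2 : (decide (40 ≤ PySem.Int.floordiv g 1000000) && decide (PySem.Int.floordiv g 1000000 ≤ 66)) = true := by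
            simp only [Bool.and_eq_true, decide_eq_true_eq]; omega
          have hOT : pvIsOT g = false := by simp only [pvIsOT, Bool.decide_and]; exact e1
          have hNT : pvIsNT g = true := by simp only [pvIsNT, Bool.decide_and]; exact e2
          cases ot <;> cases nt <;>
            simp_all [pvLoopA, pvFinish, e1, e2, hOT, hNT, ih]
        ·
          have hc1 : ¬(1 ≤ PySem.Int.floordiv g 1000000 ∧ PySem.Int.floordiv g 1000000 ≤ 39) := hot
          have hc2 : ¬(¬(1 ≤ PySem.Int.floordiv g 1000000 ∧ PySem.Int.floordiv g 1000000 ≤ 39) ∧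
              (40 ≤ PySem.Int.floordiv g 1000000 ∧ PySem.Int.floordiv g 1000000 ≤ 66)) :=
            fun h2 => hnt h2.2
          have hOT : pvIsOT g = false := by
            simp only [pvIsOT, decide_eq_false_iff_not]; exact hot
          have hNT : pvIsNT g = false := by
            simp only [pvIsNT, decide_eq_false_iff_not]; exact hnt
          simp only [pvLoopA, List.any_cons, hOT, hNT, Bool.false_or, if_neg hc1, if_neg hc2, h,
            Bool.false_eq_true, if_false]
          exact ih ot nt h

-- ===== VERDICT (by name: the statement is the Claim_ definition above) =====
theorem derive_era_py_spec : Claim_equal_derive_era_py := by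
  intro xs _
  unfold Spec_derive_era_py derive_era_py derive_era_py_alt
  rw [pvLoopA_finish xs false false rfl]
  simp [pvFinish]
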